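-- pv_equiv track=rewrite | github.com/sergeylobachev/leetcode | Contests/Weekly Contest 384/1.py | solution
-- ===== SOURCE A (Python) =====
-- def solution(matrix):
--     R = len(matrix)
--     C = len(matrix[0])
--
--     for i in range(R):
--         for j in range(C):
--             if matrix[i][j] == -1:
--                 m = float("-inf")
--                 for k in range(R):
--                     if matrix[k][j] > m:
--                         m = matrix[k][j]
--                 matrix[i][j] = m
--
--     return matrix
-- ===== SOURCE B (Python) =====
-- def solution(matrix):
--     C = len(matrix[0])
--     col_max = [max(row[j] for row in matrix) for j in range(C)]
--     for row in matrix: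
--         for j in range(C):
--             if row[j] == -1:
--                 row[j] = col_max[j]
--     return matrix
-- ===== Notes on version B (the rewrite author's own statement) =====
-- stated objective: alternative
-- what changed: B precomputes each column's maximum once into a table and fills the -1 cells from it in a single pass, instead of A's full column rescan for every -1 cell; per cell A and B agree because replacing a -1 by the column maximum never changes that column's maximum.
import Mathlib
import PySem

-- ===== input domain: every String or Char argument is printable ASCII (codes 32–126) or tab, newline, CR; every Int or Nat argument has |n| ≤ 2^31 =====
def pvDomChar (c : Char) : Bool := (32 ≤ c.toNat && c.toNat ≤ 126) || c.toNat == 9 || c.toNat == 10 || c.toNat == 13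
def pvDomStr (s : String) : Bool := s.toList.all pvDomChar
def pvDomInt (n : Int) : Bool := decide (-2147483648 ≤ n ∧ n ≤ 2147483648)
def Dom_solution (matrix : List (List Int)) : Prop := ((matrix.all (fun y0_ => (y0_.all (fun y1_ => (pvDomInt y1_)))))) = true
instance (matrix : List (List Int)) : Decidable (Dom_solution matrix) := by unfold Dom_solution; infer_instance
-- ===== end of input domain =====

-- Header: B replaces A's per-(-1)-cell column rescan by a single precomputed table of
-- column maxima (objective: alternative algorithm). Both A and B mutate `matrix` in
-- place in Python in the same way; the equivalence proved here is about the return value.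

-- ===== PORT A =====
-- matrix[i][j] (indices always in range under Pre_)
def pvCell (mat : List (List Int)) (i j : Int) : Int :=
  PySem.List.pyGetD (PySem.List.pyGetD mat i []) j 0

-- the inner `for k in range(R)` running-max loop, m starting at float("-inf") = none
def pvColScan (mat : List (List Int)) (j R : Int) : Option Int :=
  (PySem.List.pyRange 0 R 1).foldl
    (fun m k =>
      let v := pvCell mat k j
      if (match m with | none => true | some mv => decide (v > mv)) = true then some v else m)
    none

-- matrix[i][j] = v
def pvSet (mat : List (List Int)) (i j : Int) (v : Int) : List (List Int) :=
  PySem.List.pySetD mat i (PySem.List.pySetD (PySem.List.pyGetD mat i []) j v)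

def solution (matrix : List (List Int)) : List (List Int) :=
  let R : Int := matrix.length
  let C : Int := (PySem.List.pyGetD matrix 0 []).length
  (PySem.List.pyRange 0 R 1).foldl
    (fun mat i =>
      (PySem.List.pyRange 0 C 1).foldl
        (fun mat j =>
          if pvCell mat i j = -1 then
            pvSet mat i j ((pvColScan mat j R).getD 0)
          else mat)
        mat)
    matrix

-- ===== PORT B =====
def solution_alt (matrix : List (List Int)) : List (List Int) :=
  let C : Int := (PySem.List.pyGetD matrix 0 []).length
  let colMax : List Int :=
    (PySem.List.pyRange 0 C 1).map
      (fun j =>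
        (PySem.List.max? (matrix.map (fun row => PySem.List.pyGetD row j 0))
          (fun x => x)).getD 0)
  matrix.map (fun row =>
    (PySem.List.pyRange 0 C 1).foldl
      (fun r j =>
        if PySem.List.pyGetD r j 0 = -1 then
          PySem.List.pySetD r j (PySem.List.pyGetD colMax j 0)
        else r)
      row)

-- ===== PRECONDITION & SPEC =====
-- Pre_ excludes exactly the inputs where A raises: the empty matrix (IndexError on
-- matrix[0]) and matrices with a row shorter than row 0 (IndexError on matrix[i][j]).
def Pre_solution (matrix : List (List Int)) : Prop :=
  matrix ≠ [] ∧ ∀ row ∈ matrix, matrix.headI.length ≤ row.length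
instance (matrix : List (List Int)) : Decidable (Pre_solution matrix) := by
  unfold Pre_solution; infer_instance

def pvWitness_solution : List (List Int) := [[1, -1], [-1, 3]]

def Spec_solution (matrix : List (List Int)) (out : List (List Int)) : Prop := out = solution_alt matrix
instance (matrix : List (List Int)) (out : List (List Int)) : Decidable (Spec_solution matrix out) := by unfold Spec_solution; infer_instance

-- ===== CLAIM (what is proved, stated in full; the proofs are below) =====
def Claim_equal_solution : Prop := ∀ (matrix : List (List Int)), Dom_solution matrix → Pre_solution matrix → Spec_solution matrix (solution matrix)

-- ===== LEMMAS AND PROOFS =====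

-- cell (k,l) of the original matrix, Nat indices, default 0
def pvA (a : List (List Int)) (k l : Nat) : Int := (a.getD k []).getD l 0

-- maximum of column l of the original matrix (0 if the matrix is empty)
def pvColM (a : List (List Int)) (l : Nat) : Int :=
  match a.map (fun row => row.getD l 0) with
  | [] => 0
  | x :: t => t.foldl max x

-- target value of cell (k,l) after the rewrite
def pvT (a : List (List Int)) (C k l : Nat) : Int :=
  if l < C ∧ pvA a k l = -1 then pvColM a l else pvA a k l

-- A's inner-loop body (definitionally the lambda inside `solution`)
def pvStepA (R : Int) (mat : List (List Int)) (i j : Int) : List (List Int) :=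
  if pvCell mat i j = -1 then pvSet mat i j ((pvColScan mat j R).getD 0) else mat

-- invariant: cells strictly before (i,j) in row-major order are rewritten, the rest original
def pvInv (a : List (List Int)) (C i j : Nat) (mat : List (List Int)) : Prop :=
  mat.length = a.length ∧ ∀ k, (mat.getD k []).length = (a.getD k []).length ∧
    ∀ l, (mat.getD k []).getD l 0 =
      if k < i ∨ (k = i ∧ l < j) then pvT a C k l else pvA a k l

theorem pvFoldInv {α : Type} (f : α → Nat → α) (P : Nat → α → Prop) :
    ∀ (n : Nat) (s : α), P 0 s → (∀ k t, k < n → P k t → P (k+1) (f t k)) →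
      P n ((List.range n).foldl f s)
  | 0, s, h0, _ => by simpa using h0
  | n+1, s, h0, hs => by
      rw [List.range_succ, List.foldl_append]
      exact hs n _ (Nat.lt_succ_self n)
        (pvFoldInv f P n s h0 (fun k t hk => hs k t (by omega)))

theorem pvFoldMax : ∀ (t : List Int) (x : Int),
    t.foldl (fun m v =>
        if (match m with | none => true | some mv => decide (v > mv)) = true
        then some v else m) (some x)
      = some (t.foldl max x)
  | [], _ => rfl
  | v :: t, x => by
      have h : (if (match (some x : Option Int) with | none => true | some mv => decide (v > mv)) = true then some v else some x) = some (max x v) := by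
        by_cases hvx : x < v
        · simp [hvx, max_eq_right hvx.le]
        · simp [show ¬ (x < v) from hvx, max_eq_left (by omega : v ≤ x)]
      rw [List.foldl_cons, List.foldl_cons, h, pvFoldMax t (max x v)]

theorem pvFoldMax0 (x : Int) (t : List Int) :
    (x :: t).foldl (fun m v =>
        if (match m with | none => true | some mv => decide (v > mv)) = true
        then some v else m) none
      = some (t.foldl max x) := by
  rw [List.foldl_cons]
  exact pvFoldMax t x

theorem pvMaxEqOf (x : Int) (t : List Int) (M : Int)
    (hub : ∀ y ∈ x :: t, y ≤ M) (hmem : M ∈ x :: t) : t.foldl max x = M := by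
  obtain ⟨h1, h2⟩ := PySem.List.le_foldl_max t x
  have hle : t.foldl max x ≤ M := by
    rcases PySem.List.foldl_max_mem t x with h | h
    · rw [h]; exact hub x (List.mem_cons_self)
    · exact hub _ (List.mem_cons_of_mem _ h)
  have hge : M ≤ t.foldl max x := by
    rcases List.mem_cons.mp hmem with h | h
    · omega
    · exact h2 _ h
  omega

theorem pvGetD_set {α : Type} (l : List α) (d : α) (i k : Nat) (x : α) (hi : i < l.length) :
    (l.set i x).getD k d = if k = i then x else l.getD k d := by
  simp only [List.getD_eq_getElem?_getD, List.getElem?_set]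
  split
  · rename_i h; subst h; simp
  · rename_i h; rw [if_neg (by omega)]

theorem pvScan (a mat : List (List Int)) (j : Nat) (ha : a ≠ []) (hlen : mat.length = a.length)
    (hc : ∀ k, k < a.length → ∀ l, (mat.getD k []).getD l 0 = pvA a k l ∨
          (pvA a k l = -1 ∧ (mat.getD k []).getD l 0 = pvColM a l)) :
    pvColScan mat ↑j ↑mat.length = some (pvColM a j) := by
  have h1 : pvColScan mat ↑j ↑mat.length
      = mat.foldl (fun m row =>
          if (match m with | none => true | some mv => decide (PySem.List.pyGetD row (↑j) 0 > mv)) = true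
          then some (PySem.List.pyGetD row (↑j) 0) else m) none :=
    PySem.List.foldl_pyRange_zero_pyGetD' mat []
      (fun (m : Option Int) (row : List Int) =>
        if (match m with | none => true | some mv => decide (PySem.List.pyGetD row (↑j) 0 > mv)) = true
        then some (PySem.List.pyGetD row (↑j) 0) else m) none
  rw [h1]
  simp only [PySem.List.pyGetD_natCast]
  rw [← List.foldl_map (f := fun row : List Int => row.getD j 0)
    (g := fun m v => if (match m with | none => true | some mv => decide (v > mv)) = true then some v else m)
    (l := mat) (init := (none : Option Int))]
  obtain ⟨m0, mt, rfl⟩ : ∃ m0 mt, mat = m0 :: mt := by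
    cases mat with
    | nil => exact absurd (List.eq_nil_of_length_eq_zero (by simpa using hlen.symm)) ha
    | cons m0 mt => exact ⟨m0, mt, rfl⟩
  simp only [List.map_cons]
  rw [pvFoldMax0]
  congr 1
  -- facts about the original column
  have hane : a.map (fun row : List Int => row.getD j 0) ≠ [] := by simpa using ha
  obtain ⟨r, rs, rfl⟩ : ∃ r rs, a = r :: rs := by
    cases a with
    | nil => exact absurd rfl ha
    | cons r rs => exact ⟨r, rs, rfl⟩
  set a := r :: rs with hadef
  have hColM : pvColM a j = (rs.map (fun row : List Int => row.getD j 0)).foldl max (r.getD j 0) := rfl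
  have hub : ∀ y ∈ a.map (fun row : List Int => row.getD j 0), y ≤ pvColM a j := by
    rw [hColM, hadef]
    intro y hy
    rcases List.mem_cons.mp hy with h | h
    · subst h; exact (PySem.List.le_foldl_max _ _).1
    · exact (PySem.List.le_foldl_max _ _).2 y h
  have hamem : pvColM a j ∈ a.map (fun row : List Int => row.getD j 0) := by
    rw [hColM, hadef]
    rcases PySem.List.foldl_max_mem (rs.map (fun row : List Int => row.getD j 0)) (r.getD j 0) with h | h
    · rw [h]; exact List.mem_cons_self
    · exact List.mem_cons_of_mem _ h
  -- transfer to the current (partially rewritten) column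
  have hcell : ∀ k, (hk : k < (m0 :: mt).length) →
      ((m0 :: mt).map (fun row : List Int => row.getD j 0))[k]'(by simpa using hk)
        = ((m0 :: mt).getD k []).getD j 0 := by
    intro k hk
    rw [List.getElem_map, List.getD_eq_getElem _ _ hk]
  have hacell : ∀ k, (hk : k < a.length) →
      (a.map (fun row : List Int => row.getD j 0))[k]'(by simpa using hk) = pvA a k j := by
    intro k hk
    rw [List.getElem_map, pvA, List.getD_eq_getElem _ _ hk]
  apply pvMaxEqOf
  · intro y hy
    obtain ⟨k, hk, hky⟩ := List.mem_iff_getElem.mp (by simpa using hy : y ∈ (m0 :: mt).map (fun row : List Int => row.getD j 0))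
    have hk' : k < a.length := by rw [← hlen]; simpa using hk
    have := hcell k (by simpa using hk)
    rw [this] at hky
    rcases hc k hk' j with h | h
    · rw [hky] at h; rw [h]
      have : pvA a k j ∈ a.map (fun row : List Int => row.getD j 0) := by
        rw [← hacell k hk']; exact List.getElem_mem _
      exact hub _ this
    · omega
  · obtain ⟨k, hk, hkv⟩ := List.mem_iff_getElem.mp hamem
    have hk' : k < a.length := by simpa using hk
    have hkv' : pvA a k j = pvColM a j := by rw [← hacell k hk']; exact hkv
    have hkm : k < (m0 :: mt).length := by rw [hlen]; exact hk'
    have hcur : ((m0 :: mt).getD k []).getD j 0 = pvColM a j := by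
      rcases hc k hk' j with h | h
      · rw [h, hkv']
      · exact h.2
    have : pvColM a j = ((m0 :: mt).map (fun row : List Int => row.getD j 0))[k]'(by simpa using hkm) := by
      rw [hcell k hkm, hcur]
    rw [this]
    exact List.getElem_mem _

theorem pvExtRow (x y : List Int) (hl : x.length = y.length)
    (h : ∀ l, x.getD l 0 = y.getD l 0) : x = y := by
  apply List.ext_getElem hl
  intro l h1 h2
  have := h l
  rwa [List.getD_eq_getElem _ _ h1, List.getD_eq_getElem _ _ h2] at this

theorem pvExt (x y : List (List Int)) (hl : x.length = y.length)
    (h : ∀ k, (x.getD k []).length = (y.getD k []).length ∧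
        ∀ l, (x.getD k []).getD l 0 = (y.getD k []).getD l 0) : x = y := by
  apply List.ext_getElem hl
  intro k h1 h2
  have hx : x.getD k [] = x[k] := List.getD_eq_getElem _ _ h1
  have hy : y.getD k [] = y[k] := List.getD_eq_getElem _ _ h2
  have := pvExtRow (x.getD k []) (y.getD k []) (h k).1 (h k).2
  rw [hx, hy] at this; exact this

theorem pvStepInv (a : List (List Int)) (C : Nat) (ha : a ≠ [])
    (hrows : ∀ k, k < a.length → C ≤ (a.getD k []).length)
    (i j : Nat) (hi : i < a.length) (hj : j < C) (mat : List (List Int))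
    (hInv : pvInv a C i j mat) : pvInv a C i (j+1) (pvStepA ↑a.length mat ↑i ↑j) := by
  obtain ⟨hlen, hcells⟩ := hInv
  have hcellij : pvCell mat ↑i ↑j = pvA a i j := by
    unfold pvCell
    simp only [PySem.List.pyGetD_natCast]
    rw [(hcells i).2 j, if_neg (by omega)]
  have hscan : pvColScan mat ↑j ↑a.length = some (pvColM a j) := by
    rw [← hlen]
    apply pvScan a mat j ha hlen
    intro k hk l
    have hc := (hcells k).2 l
    by_cases hcond : k < i ∨ (k = i ∧ l < j)
    · rw [if_pos hcond] at hc
      unfold pvT at hc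
      by_cases h2 : l < C ∧ pvA a k l = -1
      · rw [if_pos h2] at hc; exact Or.inr ⟨h2.2, hc⟩
      · rw [if_neg h2] at hc; exact Or.inl hc
    · rw [if_neg hcond] at hc; exact Or.inl hc
  unfold pvStepA
  rw [hcellij, hscan]
  by_cases hA : pvA a i j = -1
  · rw [if_pos hA]
    simp only [Option.getD_some]
    have hset : pvSet mat ↑i ↑j (pvColM a j)
        = mat.set i ((mat.getD i []).set j (pvColM a j)) := by
      unfold pvSet
      simp only [PySem.List.pySetD_natCast, PySem.List.pyGetD_natCast]
    rw [hset]
    have hilen : i < mat.length := by omega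
    refine ⟨by simpa using hlen, fun k => ?_⟩
    by_cases hki : k = i
    · subst hki
      rw [pvGetD_set _ _ k k _ hilen, if_pos rfl]
      refine ⟨by rw [List.length_set]; exact (hcells k).1, fun l => ?_⟩
      have hjrow : j < (mat.getD k []).length := by
        have := hrows k hi; rw [(hcells k).1]; omega
      rw [pvGetD_set _ _ j l _ hjrow]
      by_cases hlj : l = j
      · subst hlj
        rw [if_pos rfl, if_pos (by omega)]
        unfold pvT
        rw [if_pos ⟨hj, hA⟩]
      · rw [if_neg hlj, (hcells k).2 l]
        split_ifs <;> first | rfl | (exfalso; omega)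
    · rw [pvGetD_set _ _ i k _ hilen, if_neg hki]
      refine ⟨(hcells k).1, fun l => ?_⟩
      rw [(hcells k).2 l]
      split_ifs <;> first | rfl | (exfalso; omega)
  · rw [if_neg hA]
    refine ⟨hlen, fun k => ⟨(hcells k).1, fun l => ?_⟩⟩
    rw [(hcells k).2 l]
    by_cases hki : k = i
    · subst hki
      by_cases hlj : l = j
      · subst hlj
        rw [if_neg (by omega), if_pos (by omega)]
        unfold pvT
        rw [if_neg (by tauto)]
      · split_ifs <;> first | rfl | (exfalso; omega)
    · split_ifs <;> first | rfl | (exfalso; omega)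

theorem pvRoll (a : List (List Int)) (C i : Nat) (mat : List (List Int))
    (h : pvInv a C i C mat) : pvInv a C (i+1) 0 mat := by
  refine ⟨h.1, fun k => ⟨(h.2 k).1, fun l => ?_⟩⟩
  rw [(h.2 k).2 l]
  by_cases hki : k = i
  · subst hki
    by_cases hlC : l < C
    · rw [if_pos (by omega), if_pos (by omega)]
    · rw [if_neg (by omega), if_pos (by omega)]
      unfold pvT
      rw [if_neg (by tauto)]
  · split_ifs <;> first | rfl | (exfalso; omega)

theorem pvInit (a : List (List Int)) (C : Nat) : pvInv a C 0 0 a :=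
  ⟨rfl, fun k => ⟨rfl, fun l => by rw [if_neg (by omega)]; rfl⟩⟩

theorem pvAChar (matrix : List (List Int)) (ha : matrix ≠ [])
    (hrows : ∀ k, k < matrix.length →
      (PySem.List.pyGetD matrix 0 []).length ≤ (matrix.getD k []).length) :
    pvInv matrix (PySem.List.pyGetD matrix 0 []).length matrix.length 0 (solution matrix) := by
  have hsol : solution matrix = (List.range matrix.length).foldl
      (fun (mat : List (List Int)) (i : Nat) =>
        (List.range (PySem.List.pyGetD matrix 0 []).length).foldl
          (fun (mat' : List (List Int)) (j : Nat) => pvStepA ↑matrix.length mat' ↑i ↑j) mat)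
      matrix := by
    show (PySem.List.pyRange 0 ↑matrix.length).foldl
        (fun mat i => (PySem.List.pyRange 0 ↑(PySem.List.pyGetD matrix 0 []).length).foldl
          (fun mat j => if pvCell mat i j = -1
            then pvSet mat i j ((pvColScan mat j ↑matrix.length).getD 0) else mat) mat)
        matrix = _
    rw [PySem.List.pyRange_zero_natCast matrix.length, List.foldl_map]
    apply List.foldl_ext
    intro acc i _
    rw [PySem.List.pyRange_zero_natCast, List.foldl_map]
    rfl
  rw [hsol]
  exact pvFoldInv
    (fun (mat : List (List Int)) (i : Nat) =>
      (List.range (PySem.List.pyGetD matrix 0 []).length).foldl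
        (fun (mat' : List (List Int)) (j : Nat) => pvStepA ↑matrix.length mat' ↑i ↑j) mat)
    (fun i mat => pvInv matrix (PySem.List.pyGetD matrix 0 []).length i 0 mat)
    matrix.length matrix (pvInit _ _)
    (fun i mat hi hInv =>
      pvRoll matrix (PySem.List.pyGetD matrix 0 []).length i _
        (pvFoldInv (fun (mat' : List (List Int)) (j : Nat) => pvStepA ↑matrix.length mat' ↑i ↑j)
          (fun j mat'' => pvInv matrix (PySem.List.pyGetD matrix 0 []).length i j mat'')
          (PySem.List.pyGetD matrix 0 []).length mat hInv
          (fun j mat' hj hInv' => pvStepInv matrix _ ha hrows i j hi hj mat' hInv')))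

def pvColML (matrix : List (List Int)) : List Int :=
  (PySem.List.pyRange 0 ↑(PySem.List.pyGetD matrix 0 []).length).map
    (fun jJ => (PySem.List.max? (matrix.map (fun row2 => PySem.List.pyGetD row2 jJ 0)) (fun x => x)).getD 0)

theorem pvColMaxList (r : List Int) (rs : List (List Int)) (j : Nat)
    (hj : j < (PySem.List.pyGetD (r :: rs) 0 []).length) :
    PySem.List.pyGetD (pvColML (r :: rs)) ↑j 0 = pvColM (r :: rs) j := by
  unfold pvColML
  rw [PySem.List.pyGetD_map_pyRange _ _ j 0 hj]
  simp only [List.map_cons, PySem.List.pyGetD_natCast]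
  rw [PySem.List.max?_id_cons, Option.getD_some]
  rfl

theorem pvBRow (a : List (List Int)) (C : Nat) (colL : List Int)
    (hcol : ∀ j, j < C → PySem.List.pyGetD colL ↑j 0 = pvColM a j)
    (row : List Int) (hC : C ≤ row.length) :
    ((PySem.List.pyRange 0 ↑C).foldl
        (fun r jI => if PySem.List.pyGetD r jI 0 = -1
          then PySem.List.pySetD r jI (PySem.List.pyGetD colL jI 0) else r) row).length = row.length ∧
    ∀ l, ((PySem.List.pyRange 0 ↑C).foldl
        (fun r jI => if PySem.List.pyGetD r jI 0 = -1
          then PySem.List.pySetD r jI (PySem.List.pyGetD colL jI 0) else r) row).getD l 0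
      = (if l < C ∧ row.getD l 0 = -1 then pvColM a l else row.getD l 0) := by
  rw [PySem.List.pyRange_zero_natCast, List.foldl_map]
  apply pvFoldInv
    (fun r j => if PySem.List.pyGetD r (↑j) 0 = -1
      then PySem.List.pySetD r (↑j) (PySem.List.pyGetD colL (↑j) 0) else r)
    (fun j r => r.length = row.length ∧
      ∀ l, r.getD l 0 = (if l < j ∧ row.getD l 0 = -1 then pvColM a l else row.getD l 0))
    C row
  · exact ⟨rfl, fun l => by rw [if_neg (by omega)]⟩
  · intro j rr hj hP
    obtain ⟨hlen, hcells⟩ := hP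
    have hrj : PySem.List.pyGetD rr (↑j : Int) 0 = row.getD j 0 := by
      rw [PySem.List.pyGetD_natCast, hcells j, if_neg (by omega)]
    simp only [hrj]
    by_cases hm : row.getD j 0 = -1
    · rw [if_pos hm, PySem.List.pySetD_natCast, hcol j hj]
      have hjr : j < rr.length := by omega
      constructor
      · rw [List.length_set]; exact hlen
      · intro l
        rw [pvGetD_set _ _ j l _ hjr]
        by_cases hlj : l = j
        · subst hlj
          rw [if_pos rfl, if_pos ⟨by omega, hm⟩]
        · rw [if_neg hlj, hcells l]
          split_ifs <;> first | rfl | (exfalso; omega)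
    · rw [if_neg hm]
      refine ⟨hlen, fun l => ?_⟩
      rw [hcells l]
      by_cases hlj : l = j
      · subst hlj
        rw [if_neg (by omega), if_neg (fun h => hm h.2)]
      · split_ifs <;> first | rfl | (exfalso; omega)

theorem pvGetD_oor (x : List (List Int)) (k : Nat) (hk : x.length ≤ k) : x.getD k [] = [] := by
  simp [List.getD_eq_getElem?_getD, List.getElem?_eq_none hk]

-- ===== VERDICT (by name: the statement is the Claim_ definition above) =====
theorem solution_spec : Claim_equal_solution := by
  unfold Claim_equal_solution Spec_solution
  intro matrix _ hpre
  obtain ⟨ha, hrowsmem⟩ := hpre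
  obtain ⟨r, rs, rfl⟩ : ∃ r rs, matrix = r :: rs := by
    cases matrix with
    | nil => exact absurd rfl ha
    | cons r rs => exact ⟨r, rs, rfl⟩
  have hC0 : PySem.List.pyGetD (r :: rs) 0 [] = r := PySem.List.pyGetD_zero_cons r rs []
  have hrows : ∀ k, k < (r :: rs).length →
      (PySem.List.pyGetD (r :: rs) 0 []).length ≤ ((r :: rs).getD k []).length := by
    intro k hk
    rw [hC0]
    have hmem : (r :: rs).getD k [] ∈ r :: rs := by
      rw [List.getD_eq_getElem _ _ hk]; exact List.getElem_mem _
    simpa using hrowsmem _ hmem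
  obtain ⟨hAlen, hAcells⟩ := pvAChar (r :: rs) ha hrows
  have hBeq : solution_alt (r :: rs) = (r :: rs).map (fun row =>
      (PySem.List.pyRange 0 ↑(PySem.List.pyGetD (r :: rs) 0 []).length).foldl
        (fun rr jI => if PySem.List.pyGetD rr jI 0 = -1
          then PySem.List.pySetD rr jI (PySem.List.pyGetD (pvColML (r :: rs)) jI 0) else rr) row) := rfl
  rw [hBeq]
  apply pvExt
  · rw [hAlen, List.length_map]
  · intro k
    by_cases hk : k < (r :: rs).length
    · have hBrow : (((r :: rs).map (fun row =>
          (PySem.List.pyRange 0 ↑(PySem.List.pyGetD (r :: rs) 0 []).length).foldl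
            (fun rr jI => if PySem.List.pyGetD rr jI 0 = -1
              then PySem.List.pySetD rr jI (PySem.List.pyGetD (pvColML (r :: rs)) jI 0) else rr) row)).getD k [])
          = (PySem.List.pyRange 0 ↑(PySem.List.pyGetD (r :: rs) 0 []).length).foldl
            (fun rr jI => if PySem.List.pyGetD rr jI 0 = -1
              then PySem.List.pySetD rr jI (PySem.List.pyGetD (pvColML (r :: rs)) jI 0) else rr)
            ((r :: rs).getD k []) := by
        rw [List.getD_eq_getElem _ _ (by simpa using hk), List.getElem_map]
        rw [List.getD_eq_getElem _ _ hk]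
      have hB := pvBRow (r :: rs) (PySem.List.pyGetD (r :: rs) 0 []).length (pvColML (r :: rs))
        (fun j hj => pvColMaxList r rs j hj) ((r :: rs).getD k []) (hrows k hk)
      constructor
      · rw [hBrow, (hAcells k).1, hB.1]
      · intro l
        rw [(hAcells k).2 l, if_pos (Or.inl hk), hBrow, hB.2 l]
        rfl
    · have h1 : (solution (r :: rs)).getD k [] = [] := pvGetD_oor _ _ (by omega)
      have h2 : (((r :: rs).map (fun row =>
          (PySem.List.pyRange 0 ↑(PySem.List.pyGetD (r :: rs) 0 []).length).foldl
            (fun rr jI => if PySem.List.pyGetD rr jI 0 = -1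
              then PySem.List.pySetD rr jI (PySem.List.pyGetD (pvColML (r :: rs)) jI 0) else rr) row)).getD k [])
          = [] := pvGetD_oor _ _ (by simpa using (by omega : (r :: rs).length ≤ k))
      rw [h1, h2]
      exact ⟨rfl, fun l => rfl⟩
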